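-- pv_equiv track=rewrite | github.com/alchemist-s/e-paper-simulation | epd_updater.py | filter_regions
-- ===== SOURCE A (Python) =====
-- def filter_regions(regions):
--     """Filter regions by size and limit count"""
--     if not regions:
--         return []
--
--     # Filter by minimum size
--     min_size = 32
--     filtered = []
--     for x_min, y_min, x_max, y_max in regions:
--         width = x_max - x_min
--         height = y_max - y_min
--         if width >= min_size and height >= min_size:
--             filtered.append((x_min, y_min, x_max, y_max))
--
--     # Sort by area (largest first)
--     filtered.sort(key=lambda r: (r[2] - r[0]) * (r[3] - r[1]), reverse=True)
--
--     # Limit to top 5 regions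
--     max_regions = 5
--     if len(filtered) > max_regions:
--         filtered = filtered[:max_regions]
--
--     return filtered
-- ===== SOURCE B (Python) =====
-- def filter_regions(regions):
--     """Filter regions by size and limit count.
--
--     Single pass: keep a bounded list of the (at most) 5 largest-area regions,
--     sorted by area descending with stable tie order, instead of filtering,
--     fully sorting and slicing.
--     """
--     top = []  # at most 5 regions, area-descending, ties in input order
--     for x_min, y_min, x_max, y_max in regions:
--         if x_max - x_min >= 32 and y_max - y_min >= 32:
--             area = (x_max - x_min) * (y_max - y_min)
--             i = 0
--             while i < len(top) and (top[i][2] - top[i][0]) * (top[i][3] - top[i][1]) >= area: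
--                 i += 1
--             top.insert(i, (x_min, y_min, x_max, y_max))
--             if len(top) > 5:
--                 top.pop()
--     return top
-- ===== Notes on version B (the rewrite author's own statement) =====
-- stated objective: alternative
-- what changed: Replaces A's filter-then-full-sort-then-slice with a single pass that maintains a bounded, area-descending list of at most 5 regions via stable insertion, so the full sort of all filtered regions disappears.
import Mathlib
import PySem

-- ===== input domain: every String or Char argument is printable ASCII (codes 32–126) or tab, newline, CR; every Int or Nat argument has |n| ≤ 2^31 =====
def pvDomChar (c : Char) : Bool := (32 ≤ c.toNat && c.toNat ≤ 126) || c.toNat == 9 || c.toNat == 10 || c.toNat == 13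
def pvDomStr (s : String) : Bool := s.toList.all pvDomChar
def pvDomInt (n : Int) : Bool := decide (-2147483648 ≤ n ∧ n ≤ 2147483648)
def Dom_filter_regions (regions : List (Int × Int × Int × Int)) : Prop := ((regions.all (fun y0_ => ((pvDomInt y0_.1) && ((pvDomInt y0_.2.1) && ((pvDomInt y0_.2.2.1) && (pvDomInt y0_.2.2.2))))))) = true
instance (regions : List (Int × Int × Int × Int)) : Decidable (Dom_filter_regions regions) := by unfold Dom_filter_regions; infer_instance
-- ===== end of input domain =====

-- B replaces A's filter + full reverse sort + slice by a single pass keeping a bounded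
-- area-descending list of at most 5 regions (alternative decomposition, same results).

-- ===== PORT A =====
def filter_regions (regions : List (Int × Int × Int × Int)) : List (Int × Int × Int × Int) :=
  if regions = [] then []
  else
    let min_size : Int := 32
    let filtered : List (Int × Int × Int × Int) :=
      regions.foldl (fun acc r =>
        let width := r.2.2.1 - r.1
        let height := r.2.2.2 - r.2.1
        if width ≥ min_size && height ≥ min_size then
          acc ++ [(r.1, r.2.1, r.2.2.1, r.2.2.2)]
        else acc) []
    let sorted := PySem.List.sorted filtered (fun r => (r.2.2.1 - r.1) * (r.2.2.2 - r.2.1)) true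
    let max_regions : Int := 5
    if PySem.List.len sorted > max_regions then PySem.List.slice sorted none (some 5)
    else sorted

-- ===== PORT B =====
-- Source B's while-loop + insert: walk past entries with area ≥ the new area, put the new
-- region there (stable for ties), then drop beyond the 5th.
def insertTopB (x : Int × Int × Int × Int) : List (Int × Int × Int × Int) → List (Int × Int × Int × Int)
  | [] => [x]
  | y :: ys =>
      if (y.2.2.1 - y.1) * (y.2.2.2 - y.2.1) ≥ (x.2.2.1 - x.1) * (x.2.2.2 - x.2.1) then
        y :: insertTopB x ys
      else x :: y :: ys

def filter_regions_alt (regions : List (Int × Int × Int × Int)) : List (Int × Int × Int × Int) :=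
  regions.foldl (fun top r =>
    if r.2.2.1 - r.1 ≥ 32 && r.2.2.2 - r.2.1 ≥ 32 then
      (insertTopB r top).take 5
    else top) []

-- ===== PRECONDITION & SPEC =====
def Spec_filter_regions (regions : List (Int × Int × Int × Int)) (out : List (Int × Int × Int × Int)) : Prop := out = filter_regions_alt regions
instance (regions : List (Int × Int × Int × Int)) (out : List (Int × Int × Int × Int)) : Decidable (Spec_filter_regions regions out) := by unfold Spec_filter_regions; infer_instance

-- ===== CLAIM (what is proved, stated in full; the proofs are below) =====
def Claim_equal_filter_regions : Prop := ∀ (regions : List (Int × Int × Int × Int)), Dom_filter_regions regions → Spec_filter_regions regions (filter_regions regions)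

-- ===== LEMMAS AND PROOFS =====

-- B's bounded insertion is PySem's stable insertBy for the reverse (area-descending) order.
lemma insertTopB_eq_insertBy (x : Int × Int × Int × Int) (s : List (Int × Int × Int × Int)) :
    PySem.List.insertBy
        (fun a b => decide ((b.2.2.1 - b.1) * (b.2.2.2 - b.2.1) < (a.2.2.1 - a.1) * (a.2.2.2 - a.2.1)))
        x s = insertTopB x s := by
  induction s with
  | nil => rfl
  | cons y ys ih =>
      simp only [insertTopB, PySem.List.insertBy]
      by_cases h : (y.2.2.1 - y.1) * (y.2.2.2 - y.2.1) ≥ (x.2.2.1 - x.1) * (x.2.2.2 - x.2.1)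
      · rw [if_neg (by simpa using not_lt.mpr h), if_pos h, ih]
      · rw [if_pos (by simpa using lt_of_not_ge h), if_neg h]

-- Truncating the state before inserting does not change the truncated result.
lemma insertTopB_take (x : Int × Int × Int × Int) :
    ∀ (s : List (Int × Int × Int × Int)) (n : Nat),
      (insertTopB x s).take n = (insertTopB x (s.take n)).take n := by
  intro s
  induction s with
  | nil => intro n; simp
  | cons y ys ih =>
      intro n
      cases n with
      | zero => simp
      | succ m =>
          simp only [List.take_succ_cons, insertTopB]
          by_cases h : (y.2.2.1 - y.1) * (y.2.2.2 - y.2.1) ≥ (x.2.2.1 - x.1) * (x.2.2.2 - x.2.1)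
          · rw [if_pos h, if_pos h]
            simp only [List.take_succ_cons]
            rw [ih m]
          · rw [if_neg h, if_neg h]
            cases m with
            | zero => simp
            | succ k => simp [List.take_take]

-- Folding insertions and truncating at the end = folding bounded insertions.
lemma foldl_insertTopB_take (l : List (Int × Int × Int × Int)) :
    ∀ s : List (Int × Int × Int × Int),
      (l.foldl (fun acc x => insertTopB x acc) s).take 5 =
        l.foldl (fun top r => (insertTopB r top).take 5) (s.take 5) := by
  induction l with
  | nil => intro s; simp
  | cons x l ih =>
      intro s
      simp only [List.foldl_cons]
      rw [ih (insertTopB x s), insertTopB_take x s 5]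

-- Folding over a filtered list = folding with the test inline.
lemma foldl_filter_if {α β : Type} (p : α → Bool) (f : β → α → β) (l : List α) :
    ∀ b : β, (l.filter p).foldl f b = l.foldl (fun acc x => if p x then f acc x else acc) b := by
  induction l with
  | nil => intro b; simp
  | cons x l ih =>
      intro b
      by_cases h : p x
      · simp [h, ih]
      · simp [h, ih]

-- Top 5 of the stable reverse sort = the bounded-insertion fold.
lemma sorted_take_eq (l : List (Int × Int × Int × Int)) :
    (PySem.List.sorted l (fun r => (r.2.2.1 - r.1) * (r.2.2.2 - r.2.1)) true).take 5 =
      l.foldl (fun top r => (insertTopB r top).take 5) [] := by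
  rw [PySem.List.sorted_rev_eq_foldl_insertBy]
  simp only [insertTopB_eq_insertBy]
  exact foldl_insertTopB_take l []

-- the size filter, as a Bool predicate, and the tuple rebuilt by A's loop
def pvP (r : Int × Int × Int × Int) : Bool :=
  decide (r.2.2.1 - r.1 ≥ (32:Int)) && decide (r.2.2.2 - r.2.1 ≥ (32:Int))

lemma filtered_eq (regions : List (Int × Int × Int × Int)) :
    regions.foldl (fun acc r =>
        if (decide (r.2.2.1 - r.1 ≥ (32:Int)) && decide (r.2.2.2 - r.2.1 ≥ (32:Int))) = true then
          acc ++ [(r.1, r.2.1, r.2.2.1, r.2.2.2)]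
        else acc) [] = regions.filter pvP := by
  have hf : (fun r : Int × Int × Int × Int => (r.1, r.2.1, r.2.2.1, r.2.2.2)) = id := rfl
  have := PySem.List.foldl_append_if pvP
      (fun r : Int × Int × Int × Int => (r.1, r.2.1, r.2.2.1, r.2.2.2)) regions []
  rw [hf, List.map_id, List.nil_append] at this
  exact this

-- ===== VERDICT (by name: the statement is the Claim_ definition above) =====
theorem filter_regions_spec : Claim_equal_filter_regions := by
  intro regions _
  show filter_regions regions = filter_regions_alt regions
  by_cases hnil : regions = []
  · subst hnil; rfl
  · have hB : filter_regions_alt regions =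
        (regions.filter pvP).foldl (fun top r => (insertTopB r top).take 5) [] :=
      (foldl_filter_if pvP (fun top r => (insertTopB r top).take 5) regions []).symm
    have hA : filter_regions regions =
        (PySem.List.sorted (regions.filter pvP)
          (fun r => (r.2.2.1 - r.1) * (r.2.2.2 - r.2.1)) true).take 5 := by
      unfold filter_regions
      rw [if_neg hnil]
      show (if PySem.List.len (PySem.List.sorted
              (regions.foldl (fun acc r =>
                if (decide (r.2.2.1 - r.1 ≥ (32:Int)) && decide (r.2.2.2 - r.2.1 ≥ (32:Int))) = true then
                  acc ++ [(r.1, r.2.1, r.2.2.1, r.2.2.2)]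
                else acc) [])
              (fun r => (r.2.2.1 - r.1) * (r.2.2.2 - r.2.1)) true) > (5:Int) then
            PySem.List.slice (PySem.List.sorted
              (regions.foldl (fun acc r =>
                if (decide (r.2.2.1 - r.1 ≥ (32:Int)) && decide (r.2.2.2 - r.2.1 ≥ (32:Int))) = true then
                  acc ++ [(r.1, r.2.1, r.2.2.1, r.2.2.2)]
                else acc) [])
              (fun r => (r.2.2.1 - r.1) * (r.2.2.2 - r.2.1)) true) none (some 5)
          else PySem.List.sorted
              (regions.foldl (fun acc r =>
                if (decide (r.2.2.1 - r.1 ≥ (32:Int)) && decide (r.2.2.2 - r.2.1 ≥ (32:Int))) = true then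
                  acc ++ [(r.1, r.2.1, r.2.2.1, r.2.2.2)]
                else acc) [])
              (fun r => (r.2.2.1 - r.1) * (r.2.2.2 - r.2.1)) true) = _
      rw [filtered_eq]
      set S := PySem.List.sorted (regions.filter pvP)
          (fun r => (r.2.2.1 - r.1) * (r.2.2.2 - r.2.1)) true with hS
      by_cases hgt : PySem.List.len S > (5:Int)
      · rw [if_pos hgt, PySem.List.slice_to S (by norm_num)]
        rfl
      · rw [if_neg hgt]
        have hle : S.length ≤ 5 := by
          simp only [PySem.List.len_eq, not_lt] at hgt
          exact_mod_cast hgt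
        rw [List.take_of_length_le hle]
    rw [hA, hB, sorted_take_eq]
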